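-- pv_equiv track=rewrite | github.com/utb404/keira | test_generator/code_generator/code_processor.py | normalize_imports
-- ===== SOURCE A (Python) =====
-- def normalize_imports(code: str) -> str:
--     """
--     Нормализует импорты в коде: удаляет дубликаты и сортирует.
--
--     Args:
--         code: Исходный код
--
--     Returns:
--         Код с нормализованными импортами
--     """
--     lines = code.split("\n")
--     import_lines = []
--     other_lines = []
--     seen_imports = set()
--     in_imports = True
--
--     for line in lines:
--         stripped = line.strip()
--         if in_imports and (stripped.startswith("import ") or stripped.startswith("from ")):
--             # Удаляем дубликаты
--             import_key = stripped.split(" as ")[0].split(" import ")[0] if " as " in stripped or " import " in stripped else stripped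
--             if import_key not in seen_imports:
--                 import_lines.append(line)
--                 seen_imports.add(import_key)
--         else:
--             if in_imports and stripped and not stripped.startswith("#"):
--                 in_imports = False
--             other_lines.append(line)
--
--     # Сортировка импортов по группам:
--     # 1. Стандартная библиотека (os, sys и т.д.)
--     # 2. Сторонние библиотеки (allure, pytest, dotenv)
--     # 3. Локальные импорты (from src..., from pages...)
--     stdlib_imports = []
--     third_party_imports = []
--     local_imports = []
--
--     for imp in import_lines:
--         stripped = imp.strip()
--         if stripped.startswith("import os") or stripped.startswith("import sys"):
--             stdlib_imports.append(imp)
--         elif stripped.startswith("import allure") or stripped.startswith("import pytest") or stripped.startswith("from dotenv"):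
--             third_party_imports.append(imp)
--         elif stripped.startswith("from gpn_qa_utils") or stripped.startswith("from playwright"):
--             third_party_imports.append(imp)
--         elif stripped.startswith("from src") or stripped.startswith("from pages"):
--             local_imports.append(imp)
--         else:
--             third_party_imports.append(imp)
--
--     # Объединение в правильном порядке
--     all_imports = stdlib_imports + third_party_imports + local_imports
--
--     # Объединение
--     normalized = "\n".join(all_imports)
--     if all_imports and other_lines:
--         normalized += "\n\n"
--     normalized += "\n".join(other_lines)
--
--     return normalized
-- ===== SOURCE B (Python) =====
-- def normalize_imports(code: str) -> str:
--     """Same normalization, but dedup via one insertion-ordered dict and a stable sort on a priority key instead of three manual buckets."""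
--     imports = {}  # import_key -> first line with that key, in insertion order
--     other_lines = []
--     in_imports = True
--
--     for line in code.split("\n"):
--         stripped = line.strip()
--         if in_imports and (stripped.startswith("import ") or stripped.startswith("from ")):
--             key = stripped.split(" as ")[0].split(" import ")[0] if " as " in stripped or " import " in stripped else stripped
--             imports.setdefault(key, line)
--         else:
--             if in_imports and stripped and not stripped.startswith("#"):
--                 in_imports = False
--             other_lines.append(line)
--
--     def priority(imp):
--         s = imp.strip()
--         if s.startswith("import os") or s.startswith("import sys"):
--             return 0
--         if s.startswith("from src") or s.startswith("from pages"):
--             return 2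
--         return 1
--
--     all_imports = sorted(imports.values(), key=priority)
--
--     normalized = "\n".join(all_imports)
--     if all_imports and other_lines:
--         normalized += "\n\n"
--     normalized += "\n".join(other_lines)
--     return normalized
-- ===== Notes on version B (the rewrite author's own statement) =====
-- stated objective: simpler
-- what changed: The list+set dedup state is replaced by one insertion-ordered dict keyed by the import key (setdefault), and the three manual bucket lists are replaced by a stable sort of the deduped lines on a 0/1/2 priority key.
import Mathlib
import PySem

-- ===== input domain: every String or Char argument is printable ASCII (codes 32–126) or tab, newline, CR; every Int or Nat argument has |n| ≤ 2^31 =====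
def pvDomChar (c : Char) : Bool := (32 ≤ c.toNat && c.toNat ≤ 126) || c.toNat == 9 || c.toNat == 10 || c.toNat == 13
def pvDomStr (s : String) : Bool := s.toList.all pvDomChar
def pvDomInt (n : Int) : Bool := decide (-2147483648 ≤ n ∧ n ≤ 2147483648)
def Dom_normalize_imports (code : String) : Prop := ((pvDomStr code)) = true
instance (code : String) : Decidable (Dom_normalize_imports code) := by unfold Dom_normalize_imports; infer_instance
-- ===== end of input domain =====

-- B replaces A's list+set dedup scan with one insertion-ordered dict (setdefault) and A's three manual
-- bucket lists with a stable sort on a 0/1/2 priority key; objective: simpler.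

-- shared by both ports: the import-key expression, textually identical in Source A and Source B
-- ("stripped.split(\" as \")[0].split(\" import \")[0] if \" as \" in stripped or \" import \" in stripped else stripped";
--  split with a non-empty separator always returns a non-empty list, so [0] is headD "")
def pvImportKey (stripped : String) : String :=
  if PySem.Str.isIn " as " stripped || PySem.Str.isIn " import " stripped then
    (((PySem.Str.split? ((PySem.Str.split? stripped " as ").getD [] |>.headD "") " import ").getD []).headD "")
  else stripped

-- ===== PORT A =====
-- loop body of A's first scan (state: import_lines, other_lines, seen_imports, in_imports)
def pvAStep1 (st : List String × List String × PySem.Set String × Bool) (line : String) :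
    List String × List String × PySem.Set String × Bool :=
  let stripped := PySem.Str.strip line
  if st.2.2.2 && (PySem.Str.startswith stripped "import " || PySem.Str.startswith stripped "from ") then
    let key := pvImportKey stripped
    if PySem.Set.contains st.2.2.1 key then st
    else (st.1 ++ [line], st.2.1, PySem.Set.add st.2.2.1 key, st.2.2.2)
  else
    let inImp := if st.2.2.2 && !(stripped == "") && !(PySem.Str.startswith stripped "#") then false else st.2.2.2
    (st.1, st.2.1 ++ [line], st.2.2.1, inImp)

-- loop body of A's bucket pass (state: stdlib_imports, third_party_imports, local_imports)
def pvAStep2 (bs : List String × List String × List String) (imp : String) :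
    List String × List String × List String :=
  let s := PySem.Str.strip imp
  if PySem.Str.startswith s "import os" || PySem.Str.startswith s "import sys" then
    (bs.1 ++ [imp], bs.2.1, bs.2.2)
  else if PySem.Str.startswith s "import allure" || PySem.Str.startswith s "import pytest" || PySem.Str.startswith s "from dotenv" then
    (bs.1, bs.2.1 ++ [imp], bs.2.2)
  else if PySem.Str.startswith s "from gpn_qa_utils" || PySem.Str.startswith s "from playwright" then
    (bs.1, bs.2.1 ++ [imp], bs.2.2)
  else if PySem.Str.startswith s "from src" || PySem.Str.startswith s "from pages" then
    (bs.1, bs.2.1, bs.2.2 ++ [imp])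
  else
    (bs.1, bs.2.1 ++ [imp], bs.2.2)

-- code.split("\n") has a non-empty separator, so split? is always some
def normalize_imports (code : String) : String :=
  let lines := (PySem.Str.split? code "\n").getD []
  let st := lines.foldl pvAStep1 ([], [], PySem.Set.empty, true)
  let importLines := st.1
  let otherLines := st.2.1
  let bs := importLines.foldl pvAStep2 ([], [], [])
  let allImports := bs.1 ++ bs.2.1 ++ bs.2.2
  let normalized := PySem.Str.join "\n" allImports
  let normalized := if !allImports.isEmpty && !otherLines.isEmpty then normalized ++ "\n\n" else normalized
  normalized ++ PySem.Str.join "\n" otherLines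

-- ===== PORT B =====
-- B's priority key: 0 = stdlib, 2 = local, 1 = everything else
def pvPriority (imp : String) : Int :=
  let s := PySem.Str.strip imp
  if PySem.Str.startswith s "import os" || PySem.Str.startswith s "import sys" then 0
  else if PySem.Str.startswith s "from src" || PySem.Str.startswith s "from pages" then 2
  else 1

-- loop body of B's single scan (state: imports dict, other_lines, in_imports)
def pvBStep1 (st : PySem.Dict String String × List String × Bool) (line : String) :
    PySem.Dict String String × List String × Bool :=
  let stripped := PySem.Str.strip line
  if st.2.2 && (PySem.Str.startswith stripped "import " || PySem.Str.startswith stripped "from ") then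
    (PySem.Dict.setdefault st.1 (pvImportKey stripped) line, st.2.1, st.2.2)
  else
    let inImp := if st.2.2 && !(stripped == "") && !(PySem.Str.startswith stripped "#") then false else st.2.2
    (st.1, st.2.1 ++ [line], inImp)

def normalize_imports_alt (code : String) : String :=
  let st := ((PySem.Str.split? code "\n").getD []).foldl pvBStep1 (PySem.Dict.empty, [], true)
  let otherLines := st.2.1
  let allImports := PySem.List.sorted (PySem.Dict.values st.1) pvPriority false
  let normalized := PySem.Str.join "\n" allImports
  let normalized := if !allImports.isEmpty && !otherLines.isEmpty then normalized ++ "\n\n" else normalized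
  normalized ++ PySem.Str.join "\n" otherLines

-- ===== PRECONDITION & SPEC =====
def Spec_normalize_imports (code : String) (out : String) : Prop := out = normalize_imports_alt code
instance (code : String) (out : String) : Decidable (Spec_normalize_imports code out) := by unfold Spec_normalize_imports; infer_instance

-- ===== CLAIM (what is proved, stated in full; the proofs are below) =====
def Claim_equal_normalize_imports : Prop := ∀ (code : String), Dom_normalize_imports code → Spec_normalize_imports code (normalize_imports code)

-- ===== LEMMAS AND PROOFS =====

-- B's scan state viewed through A's eyes: import_lines = dict values, seen_imports = dict keys
def pvRel (st : PySem.Dict String String × List String × Bool) :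
    List String × List String × PySem.Set String × Bool :=
  (st.1.values, st.2.1, st.1.keys, st.2.2)

lemma set_contains_keys (d : PySem.Dict String String) (key : String) :
    PySem.Set.contains d.keys key = d.contains key := by
  simp [PySem.Set.contains, PySem.Dict.contains_eq_decide_mem_keys]

lemma loop1_eq (lines : List String) :
    ∀ (d : PySem.Dict String String) (others : List String) (flag : Bool), d.keys.Nodup →
      List.foldl pvAStep1 (d.values, others, d.keys, flag) lines
        = pvRel (List.foldl pvBStep1 (d, others, flag) lines) := by
  induction lines with
  | nil => intro d others flag _; rfl
  | cons line t ih =>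
    intro d others flag hnd
    simp only [List.foldl_cons]
    by_cases hc : (flag && (PySem.Str.startswith (PySem.Str.strip line) "import " || PySem.Str.startswith (PySem.Str.strip line) "from ")) = true
    · by_cases hk : d.contains (pvImportKey (PySem.Str.strip line)) = true
      · have hA : pvAStep1 (d.values, others, d.keys, flag) line = (d.values, others, d.keys, flag) := by
          simp only [pvAStep1]
          rw [if_pos hc, set_contains_keys, if_pos hk]
        have hB : pvBStep1 (d, others, flag) line = (d, others, flag) := by
          simp only [pvBStep1]
          rw [if_pos hc, PySem.Dict.setdefault_of_contains _ _ hk]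
        rw [hA, hB, ih d others flag hnd]
      · have hk' : d.contains (pvImportKey (PySem.Str.strip line)) = false := by
          cases h : d.contains (pvImportKey (PySem.Str.strip line)); rfl; exact absurd h hk
        have hval : (d.insert (pvImportKey (PySem.Str.strip line)) line).values = d.values ++ [line] := by
          simp [PySem.Dict.values, PySem.Dict.items_insert_of_not_contains d _ hk']
        have hkeys : (d.insert (pvImportKey (PySem.Str.strip line)) line).keys = d.keys ++ [pvImportKey (PySem.Str.strip line)] := by
          simp [PySem.Dict.keys, PySem.Dict.items_insert_of_not_contains d _ hk']
        have hA : pvAStep1 (d.values, others, d.keys, flag) line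
            = ((d.insert (pvImportKey (PySem.Str.strip line)) line).values, others,
               (d.insert (pvImportKey (PySem.Str.strip line)) line).keys, flag) := by
          simp only [pvAStep1]
          have hmem : pvImportKey (PySem.Str.strip line) ∉ d.keys := fun hm => by
            rw [← PySem.Dict.contains_iff_mem_keys] at hm
            rw [hm] at hk'
            exact absurd hk' (by simp)
          rw [if_pos hc, set_contains_keys, if_neg (by simp [hk']), hval, hkeys]
          simp [PySem.Set.add, PySem.Set.contains, hmem]
        have hB : pvBStep1 (d, others, flag) line
            = (d.insert (pvImportKey (PySem.Str.strip line)) line, others, flag) := by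
          simp only [pvBStep1]
          rw [if_pos hc, PySem.Dict.setdefault_of_not_contains _ _ hk']
        rw [hA, hB, ih _ others flag (PySem.Dict.nodup_keys_insert d _ _ hnd)]
    · have hA : pvAStep1 (d.values, others, d.keys, flag) line
          = (d.values, others ++ [line], d.keys,
             if flag && !(PySem.Str.strip line == "") && !(PySem.Str.startswith (PySem.Str.strip line) "#") then false else flag) := by
        simp only [pvAStep1]
        rw [if_neg hc]
      have hB : pvBStep1 (d, others, flag) line
          = (d, others ++ [line],
             if flag && !(PySem.Str.strip line == "") && !(PySem.Str.startswith (PySem.Str.strip line) "#") then false else flag) := by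
        simp only [pvBStep1]
        rw [if_neg hc]
      rw [hA, hB, ih d (others ++ [line]) _ hnd]

-- A's four bucket conditions, named
def pvC0 (imp : String) : Bool :=
  PySem.Str.startswith (PySem.Str.strip imp) "import os" || PySem.Str.startswith (PySem.Str.strip imp) "import sys"
def pvC1 (imp : String) : Bool :=
  PySem.Str.startswith (PySem.Str.strip imp) "import allure" || PySem.Str.startswith (PySem.Str.strip imp) "import pytest" || PySem.Str.startswith (PySem.Str.strip imp) "from dotenv"
def pvC2 (imp : String) : Bool :=
  PySem.Str.startswith (PySem.Str.strip imp) "from gpn_qa_utils" || PySem.Str.startswith (PySem.Str.strip imp) "from playwright"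
def pvCL (imp : String) : Bool :=
  PySem.Str.startswith (PySem.Str.strip imp) "from src" || PySem.Str.startswith (PySem.Str.strip imp) "from pages"

lemma startswith_excl (s p q : String) (h1 : ¬ p.toList <+: q.toList) (h2 : ¬ q.toList <+: p.toList)
    (h : PySem.Str.startswith s p = true) : PySem.Str.startswith s q = false := by
  rw [PySem.Str.startswith_eq] at h ⊢
  rw [PySem.Chars.startswith_iff] at h
  by_contra hq
  rw [Bool.not_eq_false, PySem.Chars.startswith_iff] at hq
  rcases List.prefix_or_prefix_of_prefix h hq with h' | h' <;> [exact h1 h'; exact h2 h']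

-- a local import line ("from src…"/"from pages…") matches none of A's third-party prefixes
lemma excl_CL (imp : String) (h : pvCL imp = true) : pvC1 imp = false ∧ pvC2 imp = false := by
  unfold pvCL at h
  unfold pvC1 pvC2
  rcases Bool.or_eq_true_iff.mp h with h | h <;>
  · have a1 := startswith_excl _ _ "import allure" (by decide) (by decide) h
    have a2 := startswith_excl _ _ "import pytest" (by decide) (by decide) h
    have a3 := startswith_excl _ _ "from dotenv" (by decide) (by decide) h
    have a4 := startswith_excl _ _ "from gpn_qa_utils" (by decide) (by decide) h
    have a5 := startswith_excl _ _ "from playwright" (by decide) (by decide) h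
    exact ⟨by simp only [Bool.or_eq_false_iff]; exact ⟨⟨a1, a2⟩, a3⟩,
           by simp only [Bool.or_eq_false_iff]; exact ⟨a4, a5⟩⟩

lemma pvC0_false (x : String) (h1 : ¬ (PySem.Str.startswith (PySem.Str.strip x) "import os" || PySem.Str.startswith (PySem.Str.strip x) "import sys") = true) : pvC0 x = false := by
  cases hc : pvC0 x
  · rfl
  · exact absurd hc h1

lemma pvCL_false (x : String) (h2 : ¬ (PySem.Str.startswith (PySem.Str.strip x) "from src" || PySem.Str.startswith (PySem.Str.strip x) "from pages") = true) : pvCL x = false := by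
  cases hc : pvCL x
  · rfl
  · exact absurd hc h2

lemma prio_cases (x : String) : pvPriority x = 0 ∨ pvPriority x = 1 ∨ pvPriority x = 2 := by
  unfold pvPriority
  dsimp only
  split_ifs <;> simp

lemma prio0_eq (x : String) : (pvPriority x == 0) = pvC0 x := by
  unfold pvPriority; dsimp only; split_ifs with h1 h2
  · have c0 : pvC0 x = true := h1
    rw [c0]; rfl
  · rw [pvC0_false x h1]; rfl
  · rw [pvC0_false x h1]; rfl

lemma prio2_eq (x : String) : (pvPriority x == 2) = (!pvC0 x && !pvC1 x && !pvC2 x && pvCL x) := by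
  unfold pvPriority; dsimp only; split_ifs with h1 h2
  · have c0 : pvC0 x = true := h1
    simp only [c0, Bool.not_true, Bool.false_and]; rfl
  · have cl : pvCL x = true := h2
    rcases excl_CL x cl with ⟨e1, e2⟩
    simp only [pvC0_false x h1, cl, e1, e2, Bool.not_false, Bool.and_true]; rfl
  · simp only [pvCL_false x h2, Bool.and_false]; rfl

lemma prio1_eq (x : String) : (pvPriority x == 1) = (!pvC0 x && (pvC1 x || pvC2 x || !pvCL x)) := by
  unfold pvPriority; dsimp only; split_ifs with h1 h2
  · have c0 : pvC0 x = true := h1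
    simp only [c0, Bool.not_true, Bool.false_and]; rfl
  · have cl : pvCL x = true := h2
    rcases excl_CL x cl with ⟨e1, e2⟩
    simp only [pvC0_false x h1, cl, e1, e2, Bool.not_true,
      Bool.or_self, Bool.and_false]; rfl
  · simp only [pvC0_false x h1, pvCL_false x h2, Bool.not_false, Bool.true_and, Bool.or_true]; rfl

-- A's if-chain bucket step, rewritten componentwise
lemma stepA2_eq : pvAStep2 = fun bs imp =>
    (if pvC0 imp then bs.1 ++ [imp] else bs.1,
     if !pvC0 imp && (pvC1 imp || pvC2 imp || !pvCL imp) then bs.2.1 ++ [imp] else bs.2.1,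
     if !pvC0 imp && !pvC1 imp && !pvC2 imp && pvCL imp then bs.2.2 ++ [imp] else bs.2.2) := by
  funext bs imp
  unfold pvAStep2 pvC0 pvC1 pvC2 pvCL
  dsimp only
  split_ifs with h1 h2 h3 h4 <;> simp_all

lemma bucket_eq (l : List String) :
    List.foldl pvAStep2 ([], [], []) l
      = (l.filter pvC0,
         l.filter (fun x => !pvC0 x && (pvC1 x || pvC2 x || !pvCL x)),
         l.filter (fun x => !pvC0 x && !pvC1 x && !pvC2 x && pvCL x)) := by
  rw [stepA2_eq]
  rw [PySem.List.foldl_prod_mk (f := fun s1 imp => if pvC0 imp then s1 ++ [imp] else s1)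
      (g := fun s2 imp => (if !pvC0 imp && (pvC1 imp || pvC2 imp || !pvCL imp) then s2.1 ++ [imp] else s2.1,
                           if !pvC0 imp && !pvC1 imp && !pvC2 imp && pvCL imp then s2.2 ++ [imp] else s2.2))]
  rw [PySem.List.foldl_prod_mk (f := fun s1 imp => if (!pvC0 imp && (pvC1 imp || pvC2 imp || !pvCL imp)) = true then s1 ++ [imp] else s1)
      (g := fun s2 imp => if (!pvC0 imp && !pvC1 imp && !pvC2 imp && pvCL imp) = true then s2 ++ [imp] else s2)]
  simp only [PySem.List.foldl_append_if_eq_filter, List.nil_append]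

lemma insertBy_append {α : Type} (before : α → α → Bool) (x : α) (as bs : List α)
    (ha : ∀ a ∈ as, before x a = false) :
    PySem.List.insertBy before x (as ++ bs) = as ++ PySem.List.insertBy before x bs := by
  induction as with
  | nil => rfl
  | cons a t ih =>
    simp only [List.cons_append, PySem.List.insertBy, ha a (by simp), Bool.false_eq_true, if_false]
    simp [ih (fun a ha' => ha a (by simp [ha']))]

lemma insertBy_front {α : Type} (before : α → α → Bool) (x : α) (ys : List α)
    (h : ∀ y ∈ ys, before x y = true) :
    PySem.List.insertBy before x ys = x :: ys := by
  cases ys with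
  | nil => rfl
  | cons y t => simp [PySem.List.insertBy, h y (by simp)]

lemma ins_fold (k : String → Int) (hk : ∀ x, k x = 0 ∨ k x = 1 ∨ k x = 2) :
    ∀ (l p0 p1 p2 : List String), (∀ x ∈ p0, k x = 0) → (∀ x ∈ p1, k x = 1) → (∀ x ∈ p2, k x = 2) →
      List.foldl (fun acc x => PySem.List.insertBy (fun a b => decide (k a < k b)) x acc) (p0 ++ (p1 ++ p2)) l
        = p0 ++ l.filter (fun x => k x == 0) ++ (p1 ++ l.filter (fun x => k x == 1)) ++ (p2 ++ l.filter (fun x => k x == 2)) := by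
  intro l
  induction l with
  | nil => intro p0 p1 p2 _ _ _; simp
  | cons x t ih =>
    intro p0 p1 p2 h0 h1 h2
    simp only [List.foldl_cons]
    rcases hk x with hx | hx | hx
    · have e0 : ∀ a ∈ p0 ++ [x], k a = 0 := by
        intro a ha
        rcases List.mem_append.mp ha with h | h
        · exact h0 a h
        · rw [List.mem_singleton.mp h]; exact hx
      rw [insertBy_append _ _ p0 _ (fun a ha => by simp [h0 a ha, hx]),
          insertBy_front _ _ _ (fun y hy => by
            rcases List.mem_append.mp hy with hy | hy
            · simp [h1 y hy, hx]
            · simp [h2 y hy, hx])]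
      rw [show p0 ++ (x :: (p1 ++ p2)) = (p0 ++ [x]) ++ (p1 ++ p2) by simp]
      rw [ih (p0 ++ [x]) p1 p2 e0 h1 h2]
      simp [hx, List.append_assoc]
    · have e1 : ∀ a ∈ p1 ++ [x], k a = 1 := by
        intro a ha
        rcases List.mem_append.mp ha with h | h
        · exact h1 a h
        · rw [List.mem_singleton.mp h]; exact hx
      rw [insertBy_append _ _ p0 _ (fun a ha => by simp [h0 a ha, hx]),
          insertBy_append _ _ p1 _ (fun a ha => by simp [h1 a ha, hx]),
          insertBy_front _ _ _ (fun y hy => by simp [h2 y hy, hx])]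
      rw [show p0 ++ (p1 ++ (x :: p2)) = p0 ++ ((p1 ++ [x]) ++ p2) by simp]
      rw [ih p0 (p1 ++ [x]) p2 h0 e1 h2]
      simp [hx, List.append_assoc]
    · have e2 : ∀ a ∈ p2 ++ [x], k a = 2 := by
        intro a ha
        rcases List.mem_append.mp ha with h | h
        · exact h2 a h
        · rw [List.mem_singleton.mp h]; exact hx
      rw [insertBy_append _ _ p0 _ (fun a ha => by simp [h0 a ha, hx]),
          insertBy_append _ _ p1 _ (fun a ha => by simp [h1 a ha, hx]),
          PySem.List.insertBy_of_forall_not_before _ _ p2 (fun a ha => by simp [h2 a ha, hx])]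
      rw [ih p0 p1 (p2 ++ [x]) h0 h1 e2]
      simp [hx, List.append_assoc]

lemma sorted_three (k : String → Int) (hk : ∀ x, k x = 0 ∨ k x = 1 ∨ k x = 2) (l : List String) :
    PySem.List.sorted l k false
      = l.filter (fun x => k x == 0) ++ l.filter (fun x => k x == 1) ++ l.filter (fun x => k x == 2) := by
  rw [PySem.List.sorted_eq_foldl_insertBy]
  have := ins_fold k hk l [] [] [] (by simp) (by simp) (by simp)
  simpa [List.append_assoc] using this

-- ===== VERDICT (by name: the statement is the Claim_ definition above) =====
theorem normalize_imports_spec : Claim_equal_normalize_imports := by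
  intro code _
  unfold Spec_normalize_imports normalize_imports normalize_imports_alt
  dsimp only
  have e : (([], [], PySem.Set.empty, true) : List String × List String × PySem.Set String × Bool)
      = ((PySem.Dict.empty : PySem.Dict String String).values, [], (PySem.Dict.empty : PySem.Dict String String).keys, true) := rfl
  rw [e, loop1_eq _ PySem.Dict.empty [] true (by simp [PySem.Dict.empty, PySem.Dict.keys])]
  dsimp only [pvRel]
  have hall : ∀ v : List String,
      (List.foldl pvAStep2 ([], [], []) v).1 ++ (List.foldl pvAStep2 ([], [], []) v).2.1
          ++ (List.foldl pvAStep2 ([], [], []) v).2.2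
        = PySem.List.sorted v pvPriority false := by
    intro v
    rw [bucket_eq, sorted_three pvPriority prio_cases]
    simp only [prio0_eq, prio1_eq, prio2_eq]
  simp only [hall]
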